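-- pv_equiv track=rewrite | github.com/sseering/AdventOfCode | 2017/aoc14.py | advent_reverse
-- ===== SOURCE A (Python) =====
-- from typing import List, Tuple
--
-- def advent_reverse(in_list: List[int], start: int, length: int) -> List[int]:
--     res = [_ for _ in in_list]
--     list_len = len(in_list)
--     for off in range(length):
--         dst_idx = (start + off) % list_len
--         src_idx = (start + length - 1 - off) % list_len
--         res[dst_idx] = in_list[src_idx]
--     return res
-- ===== SOURCE B (Python) =====
-- from typing import List
--
-- def advent_reverse(in_list: List[int], start: int, length: int) -> List[int]:
--     # Closed-form per-index computation: index j was last written by the offset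
--     # r = (j - start) % n (if r < length), and every write to j stores the same
--     # value in_list[(start + length - 1 - r) % n]; so build the result directly
--     # in a single pass over the result indices.
--     n = len(in_list)
--     return [in_list[(start + length - 1 - ((j - start) % n)) % n]
--             if (j - start) % n < length else in_list[j]
--             for j in range(n)]
-- ===== Notes on version B (the rewrite author's own statement) =====
-- stated objective: alternative
-- what changed: Replaces A's sequential overwrite loop over the length offsets with a closed-form single pass over the result indices, computing each entry directly from the last offset that writes it ((j-start) % n).
import Mathlib
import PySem

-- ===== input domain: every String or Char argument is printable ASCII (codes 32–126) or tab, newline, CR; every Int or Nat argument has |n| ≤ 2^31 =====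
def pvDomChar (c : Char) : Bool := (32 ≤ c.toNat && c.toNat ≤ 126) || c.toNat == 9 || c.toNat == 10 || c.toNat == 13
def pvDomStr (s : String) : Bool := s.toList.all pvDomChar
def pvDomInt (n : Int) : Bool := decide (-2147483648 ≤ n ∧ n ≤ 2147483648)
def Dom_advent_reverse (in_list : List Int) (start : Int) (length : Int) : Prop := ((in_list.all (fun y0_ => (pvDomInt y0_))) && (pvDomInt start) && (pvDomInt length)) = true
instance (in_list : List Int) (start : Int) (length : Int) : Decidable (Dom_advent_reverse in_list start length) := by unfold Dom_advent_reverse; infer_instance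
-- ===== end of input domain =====

-- B computes each output index by a closed form (last-write-wins) in a single pass over the result indices, instead of A's sequential overwrite loop over the offsets.


-- ===== PORT A =====
def advent_reverse (in_list : List Int) (start : Int) (length : Int) : List Int :=
  let res := in_list.map (fun x => x)
  let list_len : Int := (in_list.length : Int)
  (PySem.List.pyRange 0 length 1).foldl
    (fun res off =>
      let dst_idx := PySem.Int.mod (start + off) list_len
      let src_idx := PySem.Int.mod (start + length - 1 - off) list_len
      -- res[dst_idx] = in_list[src_idx]; indices are in range under Pre_ (pyGetD/pySetD exact there)
      PySem.List.pySetD res dst_idx (PySem.List.pyGetD in_list src_idx 0))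
    res

-- ===== PORT B =====
def advent_reverse_alt (in_list : List Int) (start : Int) (length : Int) : List Int :=
  let n : Int := (in_list.length : Int)
  (List.range in_list.length).map (fun (j : Nat) =>
    let r := PySem.Int.mod ((j : Int) - start) n
    if r < length then PySem.List.pyGetD in_list (PySem.Int.mod (start + length - 1 - r) n) 0
    else PySem.List.pyGetD in_list (j : Int) 0)

-- ===== PRECONDITION & SPEC =====
-- Pre_ excludes only the empty list with length > 0, where Python A raises ZeroDivisionError.
def Pre_advent_reverse (in_list : List Int) (start : Int) (length : Int) : Prop :=
  in_list ≠ [] ∨ length ≤ 0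
instance (in_list : List Int) (start : Int) (length : Int) : Decidable (Pre_advent_reverse in_list start length) := by unfold Pre_advent_reverse; infer_instance
def pvWitness_advent_reverse : List Int × Int × Int := ([1, 2, 3, 4, 5], 1, 3)

def Spec_advent_reverse (in_list : List Int) (start : Int) (length : Int) (out : List Int) : Prop := out = advent_reverse_alt in_list start length
instance (in_list : List Int) (start : Int) (length : Int) (out : List Int) : Decidable (Spec_advent_reverse in_list start length out) := by unfold Spec_advent_reverse; infer_instance

-- ===== CLAIM (what is proved, stated in full; the proofs are below) =====
def Claim_equal_advent_reverse : Prop := ∀ (in_list : List Int) (start : Int) (length : Int), Dom_advent_reverse in_list start length → Pre_advent_reverse in_list start length → Spec_advent_reverse in_list start length (advent_reverse in_list start length)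

-- ===== LEMMAS AND PROOFS =====

lemma pv_mod_nonneg (a N : Int) (hN : 0 < N) : 0 ≤ PySem.Int.mod a N := by
  rw [PySem.Int.mod_eq_emod_of_pos hN]; exact Int.emod_nonneg a (by omega)

lemma pv_mod_lt (a N : Int) (hN : 0 < N) : PySem.Int.mod a N < N := by
  rw [PySem.Int.mod_eq_emod_of_pos hN]; exact Int.emod_lt_of_pos a hN

lemma pv_pySetD_eq_set (xs : List Int) (i : Int) (v : Int) (h0 : 0 ≤ i) (h1 : i < (xs.length : Int)) :
    PySem.List.pySetD xs i v = xs.set i.toNat v := by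
  simp [PySem.List.pySetD, PySem.List.pySet?, PySem.List.pyIdx?, h0, h1]

-- a copy of the list, written as a map over its indices
lemma pv_copy_eq (xs : List Int) :
    xs.map (fun x => x) = (List.range xs.length).map (fun (j : Nat) => PySem.List.pyGetD xs (j : Int) 0) := by
  apply List.ext_getElem
  · simp
  · intro i h1 h2
    simp only [List.length_map, List.length_range] at h2
    simp [PySem.List.pyGetD_natCast, List.getD_eq_getElem?_getD, List.getElem?_eq_getElem h2]

-- congruence of the written value under mod: the value written to an index depends
-- only on the offset modulo N
lemma pv_src_congr (a b N : Int) (hN : 0 < N) :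
    PySem.Int.mod (a - PySem.Int.mod b N) N = PySem.Int.mod (a - b) N := by
  simp only [PySem.Int.mod_eq_emod_of_pos hN]
  conv_rhs => rw [Int.sub_emod]
  rw [Int.sub_emod, Int.emod_emod_of_dvd _ dvd_rfl]

-- loop invariant: after the first m iterations, index j holds the reversed value
-- iff (j - start) % n < m
lemma pv_loopA_inv (in_list : List Int) (start length : Int) (hn : 0 < in_list.length) (m : Nat) :
    (PySem.List.pyRange 0 (m : Int) 1).foldl
      (fun res off =>
        PySem.List.pySetD res (PySem.Int.mod (start + off) (in_list.length : Int))
          (PySem.List.pyGetD in_list (PySem.Int.mod (start + length - 1 - off) (in_list.length : Int)) 0))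
      (in_list.map (fun x => x))
  = (List.range in_list.length).map (fun (j : Nat) =>
      if PySem.Int.mod ((j : Int) - start) (in_list.length : Int) < (m : Int)
      then PySem.List.pyGetD in_list
        (PySem.Int.mod (start + length - 1 - PySem.Int.mod ((j : Int) - start) (in_list.length : Int)) (in_list.length : Int)) 0
      else PySem.List.pyGetD in_list (j : Int) 0) := by
  set N : Int := (in_list.length : Int) with hNdef
  have hN : 0 < N := by rw [hNdef]; exact_mod_cast hn
  induction m with
  | zero =>
    rw [PySem.List.pyRange_one_eq_nil (by norm_num)]
    simp only [List.foldl_nil]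
    rw [pv_copy_eq]
    apply List.map_congr_left
    intro j hj
    have := pv_mod_nonneg ((j : Int) - start) N hN
    rw [if_neg (by push_cast; omega)]
  | succ m ih =>
    have hcast : ((m + 1 : Nat) : Int) = (m : Int) + 1 := by push_cast; ring
    rw [hcast, PySem.List.pyRange_one_succ_right (by positivity), List.foldl_append, ih]
    simp only [List.foldl_cons, List.foldl_nil]
    have hdst0 : 0 ≤ PySem.Int.mod (start + (m : Int)) N := pv_mod_nonneg _ _ hN
    have hdst1 : PySem.Int.mod (start + (m : Int)) N < N := pv_mod_lt _ _ hN
    rw [pv_pySetD_eq_set _ _ _ hdst0 (by simpa using hdst1)]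
    apply List.ext_getElem
    · simp
    · intro i h1 h2
      simp only [List.length_map, List.length_range] at h2
      by_cases hi : i = (PySem.Int.mod (start + (m : Int)) N).toNat
      · -- the index written at this step
        have hiI : (i : Int) = PySem.Int.mod (start + (m : Int)) N := by
          rw [hi, Int.toNat_of_nonneg hdst0]
        rw [List.getElem_set, if_pos hi.symm]
        have hr : PySem.Int.mod ((i : Int) - start) N = PySem.Int.mod (m : Int) N := by
          rw [hiI]
          simp only [PySem.Int.mod_eq_emod_of_pos hN]
          rw [Int.sub_emod, Int.emod_emod_of_dvd _ dvd_rfl, ← Int.sub_emod]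
          congr 1
          ring
        have hmle : PySem.Int.mod (m : Int) N ≤ (m : Int) := by
          rw [PySem.Int.mod_eq_emod_of_pos hN]
          have h0 : (0 : Int) ≤ (m : Int) := by positivity
          have ht : 0 ≤ N * ((m : Int) / N) :=
            mul_nonneg (le_of_lt hN) (Int.ediv_nonneg h0 (le_of_lt hN))
          have heq := Int.emod_add_ediv (m : Int) N
          linarith
        rw [List.getElem_map, List.getElem_range, hr, if_pos (by omega)]
        congr 1
        have : start + length - 1 - PySem.Int.mod (m : Int) N
             = (start + length - 1) - PySem.Int.mod (m : Int) N := by ring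
        rw [this, pv_src_congr _ _ _ hN]
      · -- an untouched index
        rw [List.getElem_set, if_neg (fun h => hi h.symm)]
        simp only [List.getElem_map, List.getElem_range]
        -- the conditions 'r < m' and 'r < m+1' agree for untouched indices
        have hr0 : 0 ≤ PySem.Int.mod ((i : Int) - start) N := pv_mod_nonneg _ _ hN
        have hr1 : PySem.Int.mod ((i : Int) - start) N < N := pv_mod_lt _ _ hN
        by_cases hc : PySem.Int.mod ((i : Int) - start) N < (m : Int)
        · rw [if_pos hc, if_pos (by omega)]
        · rw [if_neg hc, if_neg ?_]
          intro hc1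
          -- then r = m, so i would be the written index: contradiction
          have hrm : PySem.Int.mod ((i : Int) - start) N = (m : Int) := by omega
          apply hi
          have : PySem.Int.mod (start + (m : Int)) N = (i : Int) := by
            rw [← hrm]
            simp only [PySem.Int.mod_eq_emod_of_pos hN]
            rw [Int.add_emod, Int.emod_emod_of_dvd _ dvd_rfl, ← Int.add_emod]
            have : start + ((i : Int) - start) = (i : Int) := by ring
            rw [this, Int.emod_eq_of_lt (by positivity) (by rw [hNdef]; exact_mod_cast h2)]
          omega
      
-- ===== VERDICT (by name: the statement is the Claim_ definition above) =====
theorem advent_reverse_spec : Claim_equal_advent_reverse := by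
  intro in_list start length _ hpre
  unfold Spec_advent_reverse advent_reverse advent_reverse_alt
  simp only []
  by_cases hlen : length ≤ 0
  · -- empty loop: both sides are a copy of the list
    rw [PySem.List.pyRange_one_eq_nil (by omega), List.foldl_nil, pv_copy_eq]
    rcases Nat.eq_zero_or_pos in_list.length with h0 | hpos
    · simp [h0]
    · apply List.map_congr_left
      intro j hj
      have hN : (0 : Int) < (in_list.length : Int) := by exact_mod_cast hpos
      have := pv_mod_nonneg ((j : Int) - start) (in_list.length : Int) hN
      rw [if_neg (by omega)]
  · have hpos : 0 < in_list.length := by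
      rcases hpre with h | h
      · exact List.length_pos_of_ne_nil h
      · omega
    have hlc : ((length.toNat : Nat) : Int) = length := Int.toNat_of_nonneg (by omega)
    rw [← hlc]
    exact pv_loopA_inv in_list start ((length.toNat : Nat) : Int) hpos length.toNat
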